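-- pv_equiv track=rewrite | github.com/JelleKraaijeveld99/CSD2 | Python2a/python_test_files/irregular_beat_test.py | ts_maker_kick54
-- ===== SOURCE A (Python) =====
-- def ts_maker_kick54(time_sign, bars):
--     #a list for timestamps inside the function
--     tskick54_func_list = []
--     counter = 0
--     #a for loop for making timestamps yes or no
--     for x in range(time_sign*bars):
--         #if statement for placing kick on the start of each bar
--         if x%10 == 0:
--           counter = x
--           tskick54_func_list.append(counter)
--         if x%2 == 0:
--            counter = x
--            tskick54_func_list.append(counter)
--
--     return tskick54_func_list
-- ===== SOURCE B (Python) =====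
-- def ts_maker_kick54(time_sign, bars):
--     # Build the beats and bar-starts as two separate range lists and sort
--     # their concatenation: multiples of ten occur in both, so they come out
--     # twice, exactly like A's double append.
--     n = time_sign * bars
--     return sorted(list(range(0, n, 2)) + list(range(0, n, 10)))
-- ===== Notes on version B (the rewrite author's own statement) =====
-- stated objective: simpler
-- what changed: Instead of a single sweep over every tick with two modulo tests and a counter variable, B constructs the even ticks and the multiples of ten as two declarative range lists and returns the sorted concatenation (multiples of ten appear in both lists, matching A's double append).
import Mathlib
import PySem

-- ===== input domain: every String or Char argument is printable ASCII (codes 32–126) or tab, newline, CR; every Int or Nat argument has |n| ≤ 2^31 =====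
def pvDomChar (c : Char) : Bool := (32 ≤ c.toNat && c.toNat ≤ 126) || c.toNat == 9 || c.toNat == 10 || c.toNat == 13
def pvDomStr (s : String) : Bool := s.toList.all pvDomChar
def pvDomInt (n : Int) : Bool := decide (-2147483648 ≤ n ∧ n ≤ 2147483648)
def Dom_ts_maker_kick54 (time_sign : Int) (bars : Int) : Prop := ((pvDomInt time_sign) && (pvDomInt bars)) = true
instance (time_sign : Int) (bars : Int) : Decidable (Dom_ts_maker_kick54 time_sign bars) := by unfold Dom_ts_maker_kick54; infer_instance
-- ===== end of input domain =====

-- B builds the even ticks and the multiples of ten as two range lists and returns the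
-- sorted concatenation (multiples of ten appear twice), instead of A's single sweep with
-- two modulo tests and a counter variable (simpler).


-- ===== PORT A =====
-- A's loop body; state = (tskick54_func_list, counter), counter carried exactly as in A
def fA (st : List Int × Int) (x : Int) : List Int × Int :=
  let st := if PySem.Int.mod x 10 = 0 then (st.1 ++ [x], x) else st
  if PySem.Int.mod x 2 = 0 then (st.1 ++ [x], x) else st

def ts_maker_kick54 (time_sign : Int) (bars : Int) : List Int :=
  ((PySem.List.pyRange 0 (time_sign * bars) 1).foldl fA ([], 0)).1

-- ===== PORT B =====
-- B: n = time_sign*bars; sorted(list(range(0, n, 2)) + list(range(0, n, 10)))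
def ts_maker_kick54_alt (time_sign : Int) (bars : Int) : List Int :=
  PySem.List.sorted
    (PySem.List.pyRange 0 (time_sign * bars) 2 ++ PySem.List.pyRange 0 (time_sign * bars) 10)
    (fun x => x) false

-- ===== PRECONDITION & SPEC =====
def Spec_ts_maker_kick54 (time_sign : Int) (bars : Int) (out : List Int) : Prop := out = ts_maker_kick54_alt time_sign bars
instance (time_sign : Int) (bars : Int) (out : List Int) : Decidable (Spec_ts_maker_kick54 time_sign bars out) := by unfold Spec_ts_maker_kick54; infer_instance

-- ===== CLAIM (what is proved, stated in full; the proofs are below) =====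
def Claim_equal_ts_maker_kick54 : Prop := ∀ (time_sign : Int) (bars : Int), Dom_ts_maker_kick54 time_sign bars → Spec_ts_maker_kick54 time_sign bars (ts_maker_kick54 time_sign bars)

-- ===== LEMMAS AND PROOFS =====

-- what one iteration of A appends
def hA (x : Int) : List Int :=
  (if PySem.Int.mod x 10 = 0 then [x] else []) ++ (if PySem.Int.mod x 2 = 0 then [x] else [])

-- what A appends at an even tick: twice if a multiple of ten, else once
def hB (x : Int) : List Int :=
  if PySem.Int.mod x 10 = 0 then [x, x] else [x]

theorem fA_fst (st : List Int × Int) (x : Int) : (fA st x).1 = st.1 ++ hA x := by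
  unfold fA hA
  split_ifs <;> simp

theorem fst_foldA (l : List Int) (acc : List Int) (c : Int) :
    (l.foldl fA (acc, c)).1 = acc ++ l.flatMap hA := by
  induction l generalizing acc c with
  | nil => simp
  | cons x l ih =>
    have : fA (acc, c) x = ((fA (acc, c) x).1, (fA (acc, c) x).2) := rfl
    rw [List.foldl_cons, this, ih, fA_fst]
    simp

theorem range1_eq (m : Int) :
    PySem.List.pyRange 0 m 1 = (List.range m.toNat).map (fun k : Nat => (k : Int)) := by
  rw [PySem.List.pyRange_one]
  simp only [Int.sub_zero, zero_add]

theorem range2_eq (m : Int) :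
    PySem.List.pyRange 0 m 2 = (List.range ((m + 1) / 2).toNat).map (fun k : Nat => 2 * (k : Int)) := by
  rw [PySem.List.pyRange_of_pos 0 m (by norm_num)]
  have hcnt : (if (0:Int) < m then ((m - 0 + 2 - 1) / 2).toNat else 0) = ((m + 1) / 2).toNat := by
    split_ifs with h <;> omega
  rw [hcnt]
  simp only [zero_add]

theorem range10_eq (m : Int) :
    PySem.List.pyRange 0 m 10 = (List.range ((m + 9) / 10).toNat).map (fun j : Nat => 10 * (j : Int)) := by
  rw [PySem.List.pyRange_of_pos 0 m (by norm_num)]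
  have hcnt : (if (0:Int) < m then ((m - 0 + 10 - 1) / 10).toNat else 0) = ((m + 9) / 10).toNat := by
    split_ifs with h <;> omega
  rw [hcnt]
  simp only [zero_add]

theorem hA_eq_hB_of_even (n : Nat) (h : n % 2 = 0) : hA (n : Int) = hB (n : Int) := by
  unfold hA hB
  simp only [PySem.Int.mod_eq_zero_iff_dvd]
  by_cases h10 : (10 : Int) ∣ (n : Int)
  · have h2 : (2 : Int) ∣ (n : Int) := dvd_trans ⟨5, by ring⟩ h10
    simp [h10, h2]
  · have h2 : (2 : Int) ∣ (n : Int) := by omega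
    simp [h10, h2]

theorem hA_eq_nil_of_odd (n : Nat) (h : n % 2 = 1) : hA (n : Int) = [] := by
  unfold hA
  simp only [PySem.Int.mod_eq_zero_iff_dvd]
  have h2 : ¬ (2 : Int) ∣ (n : Int) := by omega
  have h10 : ¬ (10 : Int) ∣ (n : Int) := fun hd => h2 (dvd_trans ⟨5, by ring⟩ hd)
  simp [h2, h10]

-- A's output, re-indexed over the even ticks only
theorem main_nat (n : Nat) :
    ((List.range n).map (fun k : Nat => (k : Int))).flatMap hA
      = ((List.range ((n + 1) / 2)).map (fun k : Nat => 2 * (k : Int))).flatMap hB := by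
  induction n with
  | zero => simp
  | succ n ih =>
    rw [List.range_succ, List.map_append, List.flatMap_append]
    rcases Nat.mod_two_eq_zero_or_one n with h | h
    · have hcnt : (n + 1 + 1) / 2 = (n + 1) / 2 + 1 := by omega
      have h2 : (2 : Int) * (((n + 1) / 2 : Nat) : Int) = (n : Int) := by
        push_cast; omega
      rw [hcnt, List.range_succ, List.map_append, List.flatMap_append, ih]
      simp only [List.map_cons, List.map_nil, List.flatMap_cons, List.flatMap_nil,
        List.append_nil, h2, hA_eq_hB_of_even n h]
    · have hcnt : (n + 1 + 1) / 2 = (n + 1) / 2 := by omega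
      rw [hcnt, ih]
      simp [hA_eq_nil_of_odd n h]

theorem toNat_succ_half (m : Int) : ((m + 1) / 2).toNat = (m.toNat + 1) / 2 := by omega

theorem hB_of_dvd (K : Nat) (h : 5 ∣ K) : hB (2 * (K : Int)) = [2 * (K : Int), 2 * (K : Int)] := by
  unfold hB
  rw [if_pos]
  rw [PySem.Int.mod_eq_zero_iff_dvd]
  obtain ⟨j, rfl⟩ := h
  exact ⟨j, by push_cast; ring⟩

theorem hB_of_not_dvd (K : Nat) (h : ¬ 5 ∣ K) : hB (2 * (K : Int)) = [2 * (K : Int)] := by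
  unfold hB
  rw [if_neg]
  rw [PySem.Int.mod_eq_zero_iff_dvd]
  rintro ⟨j, hj⟩
  refine h ⟨j.toNat, ?_⟩
  omega

-- A's flat output is a permutation of evens ++ tens
theorem permK (K : Nat) :
    (((List.range K).map (fun k : Nat => 2 * (k : Int))).flatMap hB).Perm
      (((List.range K).map (fun k : Nat => 2 * (k : Int)))
        ++ ((List.range ((K + 4) / 5)).map (fun j : Nat => 10 * (j : Int)))) := by
  induction K with
  | zero => simp
  | succ K ih =>
    rw [List.range_succ, List.map_append, List.flatMap_append]
    by_cases h5 : 5 ∣ K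
    · have hcnt : (K + 1 + 4) / 5 = (K + 4) / 5 + 1 := by omega
      have hval : 10 * (((K + 4) / 5 : Nat) : Int) = 2 * (K : Int) := by
        obtain ⟨j, rfl⟩ := h5; push_cast; omega
      rw [hcnt, List.range_succ, List.map_append]
      simp only [List.map_cons, List.map_nil, List.flatMap_cons, List.flatMap_nil,
        List.append_nil, hB_of_dvd K h5, hval]
      rw [← Multiset.coe_eq_coe] at ih ⊢
      simp only [← Multiset.coe_add, ← Multiset.cons_coe, ← Multiset.singleton_add, ih]
      abel
    · have hcnt : (K + 1 + 4) / 5 = (K + 4) / 5 := by omega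
      rw [hcnt]
      simp only [List.map_cons, List.map_nil, List.flatMap_cons, List.flatMap_nil,
        List.append_nil, hB_of_not_dvd K h5]
      rw [← Multiset.coe_eq_coe] at ih ⊢
      simp only [← Multiset.coe_add, ← Multiset.cons_coe, ← Multiset.singleton_add, ih]
      abel

-- A's flat output is nondecreasing, every element below 2*K
theorem pairwiseK (K : Nat) :
    (((List.range K).map (fun k : Nat => 2 * (k : Int))).flatMap hB).Pairwise (· ≤ ·)
      ∧ ∀ y ∈ ((List.range K).map (fun k : Nat => 2 * (k : Int))).flatMap hB, y < 2 * (K : Int) := by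
  induction K with
  | zero => simp
  | succ K ih =>
    obtain ⟨hp, hb⟩ := ih
    have hBmem : ∀ y ∈ hB (2 * (K : Int)), y = 2 * (K : Int) := by
      intro y hy
      unfold hB at hy
      split_ifs at hy <;> simp_all
    have hBpair : (hB (2 * (K : Int))).Pairwise (fun a b : Int => a ≤ b) := by
      unfold hB; split_ifs <;> simp
    constructor
    · rw [List.range_succ, List.map_append, List.flatMap_append, List.pairwise_append]
      refine ⟨hp, by simpa using hBpair, ?_⟩
      intro a ha b hbm
      simp only [List.map_cons, List.map_nil, List.flatMap_cons, List.flatMap_nil,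
        List.append_nil] at hbm
      rw [hBmem b hbm]
      exact le_of_lt (hb a ha)
    · intro y hy
      rw [List.range_succ, List.map_append, List.flatMap_append, List.mem_append] at hy
      rcases hy with hy | hy
      · have := hb y hy; push_cast; omega
      · simp only [List.map_cons, List.map_nil, List.flatMap_cons, List.flatMap_nil,
          List.append_nil] at hy
        rw [hBmem y hy]; push_cast; omega

theorem tens_count (m : Int) : ((m + 9) / 10).toNat = (((m + 1) / 2).toNat + 4) / 5 := by omega

-- ===== VERDICT (by name: the statement is the Claim_ definition above) =====
theorem ts_maker_kick54_spec : Claim_equal_ts_maker_kick54 := by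
  intro t b _
  show ts_maker_kick54 t b = ts_maker_kick54_alt t b
  unfold ts_maker_kick54 ts_maker_kick54_alt
  rw [range1_eq, range2_eq, range10_eq, fst_foldA, tens_count]
  simp only [List.nil_append]
  rw [main_nat, ← toNat_succ_half]
  exact (PySem.List.sorted_id_eq_of_perm_of_pairwise _ _
    (permK ((t * b + 1) / 2).toNat) (pairwiseK ((t * b + 1) / 2).toNat).1).symm
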